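-- pv_equiv track=rewrite | github.com/iteebz/space-os | space/cli/argv.py | extract_flag
-- ===== SOURCE A (Python) =====
-- def extract_flag(
--     args: list[str], long_flag: str, short_flag: str | None = None
-- ) -> tuple[str | None, list[str]]:
--     """Extract flag and optional value from args.
--
--     Args:
--         args: Argument list to parse
--         long_flag: Long form (e.g., "--resume")
--         short_flag: Short form (e.g., "-r")
--
--     Returns:
--         (flag_value, remaining_args) where flag_value is:
--         - None if flag not present
--         - "" if flag present without value
--         - value if flag present with value
--     """
--     flags = [long_flag]
--     if short_flag:
--         flags.append(short_flag)
--
--     value = None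
--     remaining = []
--     i = 0
--     while i < len(args):
--         if args[i] in flags:
--             if i + 1 < len(args) and not args[i + 1].startswith("-"):
--                 value = args[i + 1]
--                 i += 2
--             else:
--                 value = ""
--                 i += 1
--         else:
--             remaining.append(args[i])
--             i += 1
--     return value, remaining
-- ===== SOURCE B (Python) =====
-- def extract_flag(args, long_flag, short_flag=None):
--     flags = (long_flag, short_flag) if short_flag else (long_flag,)
--     value = None
--     remaining = []
--     pending = False  # previous token was a flag still waiting for its value
--     for a in args:
--         if pending and not a.startswith("-"):
--             value = a
--             pending = False
--         elif a in flags: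
--             value = ""
--             pending = True
--         else:
--             pending = False
--             remaining.append(a)
--     return value, remaining
-- ===== Notes on version B (the rewrite author's own statement) =====
-- stated objective: alternative
-- what changed: Replaces A's index-cursor while-loop with lookahead (i += 2 to consume a flag's value) by a single left fold over the tokens carrying a 'pending' lookbehind bit, with no index arithmetic.
import Mathlib
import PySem

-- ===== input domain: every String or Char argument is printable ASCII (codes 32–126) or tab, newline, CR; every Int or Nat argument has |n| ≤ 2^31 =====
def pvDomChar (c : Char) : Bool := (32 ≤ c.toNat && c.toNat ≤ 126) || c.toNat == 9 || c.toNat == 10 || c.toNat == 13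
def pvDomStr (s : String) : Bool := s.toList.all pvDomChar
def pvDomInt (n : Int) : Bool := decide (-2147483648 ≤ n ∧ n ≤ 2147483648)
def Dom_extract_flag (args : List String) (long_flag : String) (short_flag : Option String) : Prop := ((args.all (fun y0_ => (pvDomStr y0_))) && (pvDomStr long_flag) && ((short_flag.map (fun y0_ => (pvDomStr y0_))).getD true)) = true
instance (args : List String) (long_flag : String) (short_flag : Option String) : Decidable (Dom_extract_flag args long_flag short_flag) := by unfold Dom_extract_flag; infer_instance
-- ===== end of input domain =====

-- B replaces A's index-cursor scan with lookahead by a single left fold carrying a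
-- 'pending' lookbehind bit; same return value, no index arithmetic (objective: alternative).

-- ===== PORT A =====
-- the while loop of A: the suffix of args still to process, plus the loop state (value, remaining)
def extractLoopA (flags : List String) : List String → Option String → List String → Option String × List String
  | [], value, remaining => (value, remaining)
  | a :: rest, value, remaining =>
    if flags.contains a then
      match rest with
      | b :: rest' =>
        if PySem.Str.startswith b "-" then
          extractLoopA flags (b :: rest') (some "") remaining     -- value = ""; i += 1
        else
          extractLoopA flags rest' (some b) remaining             -- value = args[i+1]; i += 2
      | [] => (some "", remaining)                                -- flag is last: value = ""; loop ends
    else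
      extractLoopA flags rest value (remaining ++ [a])            -- remaining.append(args[i]); i += 1

def extract_flag (args : List String) (long_flag : String) (short_flag : Option String) : Option String × List String :=
  let flags : List String :=
    match short_flag with
    | some s => if s = "" then [long_flag] else [long_flag] ++ [s]   -- `if short_flag:` — truthiness
    | none => [long_flag]
  extractLoopA flags args none []

-- ===== PORT B =====
-- one fold step of B's state machine; state = (value, remaining, pending)
def stepB (flags : List String) (st : Option String × List String × Bool) (a : String) : Option String × List String × Bool :=
  match st with
  | (value, remaining, pending) =>
    if pending && !(PySem.Str.startswith a "-") then (some a, remaining, false)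
    else if flags.contains a then (some "", remaining, true)
    else (value, remaining ++ [a], false)

def extract_flag_alt (args : List String) (long_flag : String) (short_flag : Option String) : Option String × List String :=
  let flags : List String :=
    match short_flag with
    | some s => if s = "" then [long_flag] else [long_flag, s]
    | none => [long_flag]
  let st := args.foldl (stepB flags) (none, [], false)
  (st.1, st.2.1)

-- ===== PRECONDITION & SPEC =====
def Spec_extract_flag (args : List String) (long_flag : String) (short_flag : Option String) (out : Option String × List String) : Prop := out = extract_flag_alt args long_flag short_flag
instance (args : List String) (long_flag : String) (short_flag : Option String) (out : Option String × List String) : Decidable (Spec_extract_flag args long_flag short_flag out) := by unfold Spec_extract_flag; infer_instance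

-- ===== CLAIM (what is proved, stated in full; the proofs are below) =====
def Claim_equal_extract_flag : Prop := ∀ (args : List String) (long_flag : String) (short_flag : Option String), Dom_extract_flag args long_flag short_flag → Spec_extract_flag args long_flag short_flag (extract_flag args long_flag short_flag)

-- ===== LEMMAS AND PROOFS =====

-- A's lookahead loop equals B's fold started in the non-pending state.
theorem loopA_eq_foldB (flags : List String) (xs : List String) (value : Option String) (remaining : List String) :
    extractLoopA flags xs value remaining =
      (fun st => (st.1, st.2.1)) (xs.foldl (stepB flags) (value, remaining, false)) := by
  induction xs, value, remaining using extractLoopA.induct flags <;>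
    simp_all [extractLoopA, stepB, List.contains_eq_mem] <;>
    (rw [extractLoopA.eq_def]
     simp_all [List.contains_eq_mem])

-- ===== VERDICT (by name: the statement is the Claim_ definition above) =====
theorem extract_flag_spec : Claim_equal_extract_flag := by
  intro args long_flag short_flag _
  show extract_flag args long_flag short_flag = extract_flag_alt args long_flag short_flag
  unfold extract_flag extract_flag_alt
  cases short_flag with
  | none => exact loopA_eq_foldB _ args none []
  | some s =>
    by_cases hs : s = "" <;> simp only [hs, if_true, if_false] <;>
      exact loopA_eq_foldB _ args none []
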